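-- pv_equiv track=rewrite | github.com/bojanLukovac/Bioinformatika2015 | saisStep.py | getBucketHashFromSAndInitializeToMinusOne
-- ===== SOURCE A (Python) =====
-- def getBucketHashFromSAndInitializeToMinusOne(S):
--
--         bucketHash = dict()
--         for i in range(0, len(S)):
--
--                 if str(S[i]) in bucketHash.keys():
--                         bucketHash[str(S[i])].append(-1)
--                 else:
--                         values = []
--                         values.append(-1)
--                         bucketHash[str(S[i])] = values
--
--         return bucketHash
-- ===== SOURCE B (Python) =====
-- def getBucketHashFromSAndInitializeToMinusOne(S):
--     # Count occurrences per string key in one pass, then materialize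
--     # each bucket as [-1] * count over the distinct keys (first-encounter order).
--     counts = {}
--     for x in S:
--         k = str(x)
--         counts[k] = counts.get(k, 0) + 1
--     return {k: [-1] * n for k, n in counts.items()}
-- ===== Notes on version B (the rewrite author's own statement) =====
-- stated objective: idiomatic
-- what changed: Instead of growing each bucket list element-by-element with a membership test per item, B counts occurrences per string key in one pass and then builds the result in a second pass over the distinct keys, materializing each bucket by list repetition of the sentinel value count times.
import Mathlib
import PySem

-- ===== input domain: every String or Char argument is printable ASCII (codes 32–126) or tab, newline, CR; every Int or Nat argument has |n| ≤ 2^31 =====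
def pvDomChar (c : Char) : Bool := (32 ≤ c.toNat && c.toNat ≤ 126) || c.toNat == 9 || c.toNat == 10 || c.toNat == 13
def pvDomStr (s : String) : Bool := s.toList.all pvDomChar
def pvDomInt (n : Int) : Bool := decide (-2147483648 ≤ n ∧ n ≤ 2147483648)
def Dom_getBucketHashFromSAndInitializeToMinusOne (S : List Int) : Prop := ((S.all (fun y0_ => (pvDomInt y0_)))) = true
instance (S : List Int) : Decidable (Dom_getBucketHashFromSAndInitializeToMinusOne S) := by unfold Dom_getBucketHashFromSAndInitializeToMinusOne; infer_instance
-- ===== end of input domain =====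

-- B replaces A's per-element "test membership, then append -1 to the bucket" loop by a
-- counting pass followed by a build pass over distinct keys ([-1] * count); idiomatic, same cost.

-- ===== PORT A =====
def getBucketHashFromSAndInitializeToMinusOne (S : List Int) : List (String × List Int) :=
  (S.foldl
    (fun d x =>
      if d.contains (PySem.Int.toStr x) then
        d.modify (PySem.Int.toStr x) [] (fun vs => vs ++ [(-1 : Int)])
      else
        d.insert (PySem.Int.toStr x) [(-1 : Int)])
    PySem.Dict.empty).items

-- ===== PORT B =====
def getBucketHashFromSAndInitializeToMinusOne_alt (S : List Int) : List (String × List Int) :=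
  ((S.foldl
      (fun d x => d.insert (PySem.Int.toStr x) (d.getD (PySem.Int.toStr x) (0 : Int) + 1))
      PySem.Dict.empty).items).map
    (fun p => (p.1, List.replicate p.2.toNat (-1 : Int)))

-- ===== PRECONDITION & SPEC =====
def Spec_getBucketHashFromSAndInitializeToMinusOne (S : List Int) (out : List (String × List Int)) : Prop := out = getBucketHashFromSAndInitializeToMinusOne_alt S
instance (S : List Int) (out : List (String × List Int)) : Decidable (Spec_getBucketHashFromSAndInitializeToMinusOne S out) := by unfold Spec_getBucketHashFromSAndInitializeToMinusOne; infer_instance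

-- ===== CLAIM (what is proved, stated in full; the proofs are below) =====
def Claim_equal_getBucketHashFromSAndInitializeToMinusOne : Prop := ∀ (S : List Int), Dom_getBucketHashFromSAndInitializeToMinusOne S → Spec_getBucketHashFromSAndInitializeToMinusOne S (getBucketHashFromSAndInitializeToMinusOne S)

-- ===== LEMMAS AND PROOFS =====

-- modify with an absent key is insert of f applied to the default
theorem pv_modify_not_contains {κ ν : Type} [BEq κ] [LawfulBEq κ]
    (d : PySem.Dict κ ν) (k : κ) (d0 : ν) (f : ν → ν) (h : d.contains k = false) :
    d.modify k d0 f = d.insert k (f d0) := by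
  have hg := PySem.Dict.getD_of_not_contains (d := d) (k := k) (d0 := d0) h
  simp [PySem.Dict.modify, PySem.Dict.insert, h, hg]

-- A's loop step is an unconditional modify
theorem pv_stepA_eq_modify (d : PySem.Dict String (List Int)) (x : Int) :
    (if d.contains (PySem.Int.toStr x) then
        d.modify (PySem.Int.toStr x) [] (fun vs => vs ++ [(-1 : Int)])
      else
        d.insert (PySem.Int.toStr x) [(-1 : Int)])
    = d.modify (PySem.Int.toStr x) [] (fun vs => vs ++ [(-1 : Int)]) := by
  by_cases h : d.contains (PySem.Int.toStr x) = true
  · simp [h]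
  · simp only [Bool.not_eq_true] at h
    simp [h, pv_modify_not_contains _ _ _ _ h]

-- the filtered pair list collapses to a replicate of -1
theorem pv_filter_map_replicate (S : List Int) (c : String) :
    (((S.map (fun x => ((PySem.Int.toStr x), (-1 : Int)))).filter
        (fun p => p.1 == c)).map (fun p => p.2))
    = List.replicate ((S.map PySem.Int.toStr).count c) (-1 : Int) := by
  induction S with
  | nil => simp
  | cons a t ih =>
      by_cases h : PySem.Int.toStr a = c
      · simp [h, ih, List.replicate_succ]
      · simp [h, ih]

theorem getBucketHashFromSAndInitializeToMinusOne_spec_aux (S : List Int) :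
    getBucketHashFromSAndInitializeToMinusOne S = getBucketHashFromSAndInitializeToMinusOne_alt S := by
  unfold getBucketHashFromSAndInitializeToMinusOne getBucketHashFromSAndInitializeToMinusOne_alt
  -- A's fold as a uniform modify-fold
  have hA : (S.foldl
      (fun d x =>
        if d.contains (PySem.Int.toStr x) then
          d.modify (PySem.Int.toStr x) [] (fun vs => vs ++ [(-1 : Int)])
        else
          d.insert (PySem.Int.toStr x) [(-1 : Int)])
      PySem.Dict.empty)
      = (S.map (fun x => ((PySem.Int.toStr x), (-1 : Int)))).foldl
          (fun d p => d.modify p.1 [] (fun vs => vs ++ [p.2])) PySem.Dict.empty := by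
    rw [List.foldl_map]
    congr 1
    funext d x
    exact pv_stepA_eq_modify d x
  rw [hA]
  -- B's fold is counter of the mapped keys
  have hB : (S.foldl
      (fun d x => d.insert (PySem.Int.toStr x) (d.getD (PySem.Int.toStr x) (0 : Int) + 1))
      PySem.Dict.empty)
      = PySem.Dict.counter (S.map PySem.Int.toStr) := by
    rw [← PySem.Dict.foldl_insert_getD_add_one_eq_counter, List.foldl_map]
  rw [hB, PySem.Dict.items_counter]
  -- A side: items via keys + getD
  set dA := (S.map (fun x => ((PySem.Int.toStr x), (-1 : Int)))).foldl
      (fun d p => d.modify p.1 [] (fun vs => vs ++ [p.2])) PySem.Dict.empty with hdA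
  have hkeys : dA.keys = PySem.Set.ofList (S.map PySem.Int.toStr) := by
    rw [hdA, PySem.Dict.keys_foldl_modify_key
        (l := S.map (fun x => ((PySem.Int.toStr x), (-1 : Int))))
        (key := Prod.fst) (d0 := ([] : List Int))
        (f := fun _ p vs => vs ++ [p.2]) (d := PySem.Dict.empty)]
    simp [List.map_map]
    rfl
  have hnd : dA.keys.Nodup := by
    rw [hkeys]; exact PySem.Set.nodup_ofList _
  rw [PySem.Dict.items_eq_map_keys dA hnd [], hkeys, List.map_map]
  apply List.map_congr_left
  intro k _
  have hget : dA.getD k [] = List.replicate ((S.map PySem.Int.toStr).count k) (-1 : Int) := by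
    rw [hdA, PySem.Dict.getD_foldl_modify_append]
    simpa using pv_filter_map_replicate S k
  simp [hget]

-- ===== VERDICT (by name: the statement is the Claim_ definition above) =====
theorem getBucketHashFromSAndInitializeToMinusOne_spec : Claim_equal_getBucketHashFromSAndInitializeToMinusOne := by
  intro S _
  exact getBucketHashFromSAndInitializeToMinusOne_spec_aux S
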